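-- pv_equiv track=rewrite | github.com/FilipeVDuarte/Binkies3dToBlender | convert_obj.py | find_material_by_name
-- ===== SOURCE A (Python) =====
-- def find_material_by_name(name_pattern, materials):
--     """Busca material pelo nome exato (case-insensitive)."""
--     name_clean = name_pattern.replace(' ', '_').lower()
--     for mat in materials:
--         if mat['name'].replace(' ', '_').lower() == name_clean:
--             return mat
--     # Tentativa parcial se exato falhar
--     for mat in materials:
--         if name_clean in mat['name'].replace(' ', '_').lower():
--             return mat
--     return None
-- ===== SOURCE B (Python) =====
-- def find_material_by_name(name_pattern, materials):
--     """Single pass: exact match returns immediately; first partial match is remembered and returned after the loop."""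
--     name_clean = name_pattern.replace(' ', '_').lower()
--     partial = None
--     for mat in materials:
--         n = mat['name'].replace(' ', '_').lower()
--         if n == name_clean:
--             return mat
--         if partial is None and name_clean in n:
--             partial = mat
--     return partial
-- ===== Notes on version B (the rewrite author's own statement) =====
-- stated objective: alternative
-- what changed: Replaced A's two sequential scans (exact pass, then partial pass) by a single loop that normalizes each name once, returns immediately on an exact match, and carries the first partial-match candidate to return after the loop.
import Mathlib
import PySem

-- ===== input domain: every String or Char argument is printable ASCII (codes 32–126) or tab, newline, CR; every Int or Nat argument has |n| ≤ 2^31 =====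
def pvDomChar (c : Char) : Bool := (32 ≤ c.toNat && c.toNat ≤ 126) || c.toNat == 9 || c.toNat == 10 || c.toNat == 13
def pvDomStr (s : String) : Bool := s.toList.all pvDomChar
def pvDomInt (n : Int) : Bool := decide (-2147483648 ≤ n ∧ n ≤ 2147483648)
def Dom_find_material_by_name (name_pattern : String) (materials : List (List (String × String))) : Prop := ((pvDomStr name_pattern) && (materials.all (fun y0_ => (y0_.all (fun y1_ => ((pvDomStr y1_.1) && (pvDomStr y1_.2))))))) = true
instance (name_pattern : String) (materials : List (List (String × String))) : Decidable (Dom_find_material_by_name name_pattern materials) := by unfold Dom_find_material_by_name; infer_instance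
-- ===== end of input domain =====

-- B merges A's two sequential scans into one pass that normalizes each name once and
-- carries the first partial-match candidate ('alternative' objective; same asymptotic cost).

-- ===== PORT A =====
-- name.replace(' ', '_').lower()
def pvNormName (s : String) : String := PySem.Str.lower (PySem.Str.replace s " " "_")

-- first loop of A; 'none' models the KeyError on a material without a 'name' key
-- (those inputs are excluded by Pre_), 'some none' = loop completed, 'some (some m)' = returned m
def fmbnExactScan (nc : String) : List (List (String × String)) → Option (Option (List (String × String)))
  | [] => some none
  | mat :: rest =>
    match (PySem.Dict.mk mat).get? "name" with
    | none => none
    | some s => if pvNormName s == nc then some (some mat) else fmbnExactScan nc rest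

-- second loop of A ('none' again models the KeyError; unreachable when the first loop completed)
def fmbnPartialScan (nc : String) : List (List (String × String)) → Option (List (String × String))
  | [] => none
  | mat :: rest =>
    match (PySem.Dict.mk mat).get? "name" with
    | none => none
    | some s => if PySem.Str.isIn nc (pvNormName s) then some mat else fmbnPartialScan nc rest

def find_material_by_name (name_pattern : String) (materials : List (List (String × String))) : Option (List (String × String)) :=
  let name_clean := pvNormName name_pattern
  match fmbnExactScan name_clean materials with
  | some (some mat) => some mat
  | some none => fmbnPartialScan name_clean materials
  | none => none

-- ===== PORT B =====
-- B's single loop carrying the remembered partial candidate ('none' models the KeyError)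
def fmbnLoop (nc : String) (partialAcc : Option (List (String × String))) : List (List (String × String)) → Option (List (String × String))
  | [] => partialAcc
  | mat :: rest =>
    match (PySem.Dict.mk mat).get? "name" with
    | none => none
    | some s =>
      let n := pvNormName s
      if n == nc then some mat
      else fmbnLoop nc (if partialAcc.isNone && PySem.Str.isIn nc n then some mat else partialAcc) rest

def find_material_by_name_alt (name_pattern : String) (materials : List (List (String × String))) : Option (List (String × String)) :=
  fmbnLoop (pvNormName name_pattern) none materials

-- ===== PRECONDITION & SPEC =====
-- Python A raises KeyError when the scan reaches a material without a 'name' key before any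
-- exact match; Pre_ excludes exactly those inputs (every material lacking 'name' must be
-- preceded by an exact match, which makes A return before touching it). B raises there too.
def Pre_find_material_by_name (name_pattern : String) (materials : List (List (String × String))) : Prop :=
  ∀ i < materials.length, (PySem.Dict.mk (materials.getD i [])).contains "name" = false →
    ∃ j < i, ((PySem.Dict.mk (materials.getD j [])).get? "name").any
      (fun s => pvNormName s == pvNormName name_pattern) = true
instance (name_pattern : String) (materials : List (List (String × String))) : Decidable (Pre_find_material_by_name name_pattern materials) := by unfold Pre_find_material_by_name; infer_instance

def pvWitness_find_material_by_name : String × (List (List (String × String))) :=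
  ("Red Metal", [[("name", "wood")], [("name", "red_metal"), ("kd", "1 0 0")]])

def Spec_find_material_by_name (name_pattern : String) (materials : List (List (String × String))) (out : Option (List (String × String))) : Prop := out = find_material_by_name_alt name_pattern materials
instance (name_pattern : String) (materials : List (List (String × String))) (out : Option (List (String × String))) : Decidable (Spec_find_material_by_name name_pattern materials out) := by unfold Spec_find_material_by_name; infer_instance

-- ===== CLAIM (what is proved, stated in full; the proofs are below) =====
def Claim_equal_find_material_by_name : Prop := ∀ (name_pattern : String) (materials : List (List (String × String))), Dom_find_material_by_name name_pattern materials → Pre_find_material_by_name name_pattern materials → Spec_find_material_by_name name_pattern materials (find_material_by_name name_pattern materials)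

-- ===== LEMMAS AND PROOFS =====

-- B's loop, related to A's two scans, for an arbitrary carried candidate
theorem fmbnLoop_eq (nc : String) (mats : List (List (String × String))) (acc : Option (List (String × String))) :
    fmbnLoop nc acc mats =
      match fmbnExactScan nc mats with
      | some (some mat) => some mat
      | some none => match acc with
        | some a => some a
        | none => fmbnPartialScan nc mats
      | none => none := by
  induction mats generalizing acc with
  | nil => cases acc <;> simp [fmbnLoop, fmbnExactScan, fmbnPartialScan]
  | cons mat rest ih =>
    simp only [fmbnLoop, fmbnExactScan, fmbnPartialScan]
    cases h : (PySem.Dict.mk mat).get? "name" with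
    | none => rfl
    | some s =>
      dsimp only
      by_cases he : (pvNormName s == nc) = true
      · simp [he]
      · rw [if_neg he, if_neg he, ih]
        cases hx : fmbnExactScan nc rest with
        | none => rfl
        | some o =>
          cases o with
          | some m => rfl
          | none =>
            cases acc with
            | some a => rfl
            | none =>
              simp only [PySem.Str.isIn_eq]
              by_cases hp : PySem.Chars.isIn nc.toList (pvNormName s).toList = true <;> simp [hp]

theorem find_eq_alt (name_pattern : String) (materials : List (List (String × String))) :
    find_material_by_name name_pattern materials = find_material_by_name_alt name_pattern materials := by
  unfold find_material_by_name find_material_by_name_alt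
  rw [fmbnLoop_eq]

-- ===== VERDICT (by name: the statement is the Claim_ definition above) =====
theorem find_material_by_name_spec : Claim_equal_find_material_by_name := by
  intro np mats _ _
  unfold Spec_find_material_by_name
  exact find_eq_alt np mats
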